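-- pv_equiv track=rewrite | github.com/jpjsm/InterviewQuestions | Q62-AssignGuestsToTablesInEvent/python/gueststotables_1.py | AssignGuestsToTables
-- ===== SOURCE A (Python) =====
-- from typing import Dict, List
--
-- def AssignGuestsToTables(
--     guests: list[str], tables: Dict[str, set[str]], table_capacity: int = 8
-- ) -> List[str]:
--     if (
--         not isinstance(guests, (list, tuple))
--         or not all(isinstance(g, str) for g in guests)
--         or not isinstance(tables, dict)
--         or not all(isinstance(k, str) for k in tables.keys())
--         or not all(isinstance(v, set) for v in tables.values())
--     ):
--         raise ValueError("One or more arguments are not valid.")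
--
--     if len(tables) == 0:
--         return guests
--
--     seated_guests = set()
--     i = 0
--     total_guests = len(guests)
--
--     for table_id in tables.keys():
--         # clear table
--         tables[table_id] = set()
--         j = 0
--         while j < table_capacity and i < total_guests:
--             if guests[i] in seated_guests:
--                 # duplicate guest in list, ignoring her/him
--                 i += 1
--                 continue
--
--             tables[table_id].add(guests[i])
--             j += 1
--             i += 1
--
--     return guests[i:] if i < total_guests else []
-- ===== SOURCE B (Python) =====
-- def AssignGuestsToTables(guests, tables, table_capacity=8):
--     if (
--         not isinstance(guests, (list, tuple))
--         or not all(isinstance(g, str) for g in guests)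
--         or not isinstance(tables, dict)
--         or not all(isinstance(k, str) for k in tables.keys())
--         or not all(isinstance(v, set) for v in tables.values())
--     ):
--         raise ValueError("One or more arguments are not valid.")
--
--     if len(tables) == 0:
--         return guests
--
--     cap = max(table_capacity, 0)
--     for idx, table_id in enumerate(tables):
--         start = idx * cap
--         tables[table_id] = set(guests[start:start + cap])
--     return list(guests[len(tables) * cap:])
-- ===== Notes on version B (the rewrite author's own statement) =====
-- stated objective: simpler
-- what changed: A's index-threaded outer/inner loops (with a dead seated_guests dedup check that never fires) are replaced by independent block offsets: table idx gets guests[idx*cap : (idx+1)*cap] and the overflow is the single tail slice guests[len(tables)*cap:], with capacity clamped at 0.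
import Mathlib
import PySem

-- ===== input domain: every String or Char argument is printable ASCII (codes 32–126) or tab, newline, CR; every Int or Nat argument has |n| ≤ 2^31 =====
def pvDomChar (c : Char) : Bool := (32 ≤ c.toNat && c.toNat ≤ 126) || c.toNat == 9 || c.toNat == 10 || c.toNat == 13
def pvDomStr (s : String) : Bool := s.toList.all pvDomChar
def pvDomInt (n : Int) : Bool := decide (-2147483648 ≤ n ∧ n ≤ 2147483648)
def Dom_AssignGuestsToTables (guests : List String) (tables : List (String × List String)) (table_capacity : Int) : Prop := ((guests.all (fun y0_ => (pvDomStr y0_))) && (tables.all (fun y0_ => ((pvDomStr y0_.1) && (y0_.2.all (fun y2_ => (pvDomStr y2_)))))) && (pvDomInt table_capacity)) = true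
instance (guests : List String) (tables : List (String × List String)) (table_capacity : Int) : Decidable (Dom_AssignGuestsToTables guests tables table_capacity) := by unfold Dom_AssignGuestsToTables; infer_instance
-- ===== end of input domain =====

-- B replaces A's cross-table index threading by independent block offsets (idx*capacity) and a
-- single tail slice for the overflow — objective: simpler. Equivalence is about the RETURN value
-- only (both Pythons also rebuild the tables dict in place, identically). On the Lean types the
-- isinstance validation always passes, so both ports are total.

-- ===== PORT A =====
-- the inner 'while j < table_capacity and i < total_guests' loop, threading (j, i);
-- seated_guests is never added to in A, so it is the constant empty list here
def pvInnerA (guests : List String) (seated : List String) (table_capacity : Int)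
    (total : Int) (j i : Int) : Int × Int :=
  if _h : j < table_capacity ∧ i < total then
    match PySem.List.pyGet? guests i with
    | none => (j, i)   -- unreachable: total = len(guests) and 0 ≤ i < total on every call
    | some g =>
      if g ∈ seated then pvInnerA guests seated table_capacity total j (i + 1)
      else pvInnerA guests seated table_capacity total (j + 1) (i + 1)
  else (j, i)
termination_by (total - i).toNat
decreasing_by all_goals omega

def AssignGuestsToTables (guests : List String) (tables : List (String × List String)) (table_capacity : Int) : List String :=
  if tables.length = 0 then guests
  else
    let seated : List String := []
    let total : Int := (guests.length : Int)
    -- for table_id in tables.keys(): (the dict writes do not affect the return value)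
    let i := tables.foldl (fun i _ => (pvInnerA guests seated table_capacity total 0 i).2) 0
    if i < total then PySem.List.slice guests (some i) none else []

-- ===== PORT B =====
-- Source B's enumerate loop only rewrites the tables dict (a side effect); the returned value is
-- the tail slice guests[len(tables)*cap:] with cap = max(table_capacity, 0)
def AssignGuestsToTables_alt (guests : List String) (tables : List (String × List String)) (table_capacity : Int) : List String :=
  if tables.length = 0 then guests
  else
    let cap : Int := max table_capacity 0
    PySem.List.slice guests (some ((tables.length : Int) * cap)) none

-- ===== PRECONDITION & SPEC =====
def Spec_AssignGuestsToTables (guests : List String) (tables : List (String × List String)) (table_capacity : Int) (out : List String) : Prop := out = AssignGuestsToTables_alt guests tables table_capacity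
instance (guests : List String) (tables : List (String × List String)) (table_capacity : Int) (out : List String) : Decidable (Spec_AssignGuestsToTables guests tables table_capacity out) := by unfold Spec_AssignGuestsToTables; infer_instance

-- ===== CLAIM (what is proved, stated in full; the proofs are below) =====
def Claim_equal_AssignGuestsToTables : Prop := ∀ (guests : List String) (tables : List (String × List String)) (table_capacity : Int), Dom_AssignGuestsToTables guests tables table_capacity → Spec_AssignGuestsToTables guests tables table_capacity (AssignGuestsToTables guests tables table_capacity)

-- ===== LEMMAS AND PROOFS =====

-- the inner loop with empty 'seated' just advances i by min(capacity - j, remaining) guests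
theorem pvInnerA_snd (guests : List String) (cap total j i : Int)
    (hj : 0 ≤ j) (hi : 0 ≤ i) (hit : i ≤ total) (htot : total = (guests.length : Int)) :
    (pvInnerA guests [] cap total j i).2 = min (i + max (cap - j) 0) total := by
  rw [pvInnerA]
  split
  · next h =>
    have hlt : i.toNat < guests.length := by omega
    have hg := PySem.List.pyGet?_eq_some_getElem (xs := guests) (i := i) hi (by omega)
    rw [hg]
    simp only [List.not_mem_nil, if_false]
    rw [pvInnerA_snd guests cap total (j + 1) (i + 1) (by omega) (by omega) (by omega) htot]
    omega
  · next h => simp only []; omega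
termination_by (total - i).toNat
decreasing_by omega

-- the outer fold over the tables advances i by capacity per table, clamped at total
theorem pvFold_eq (guests : List String) (cap total : Int) (ts : List (String × List String))
    (htot : total = (guests.length : Int)) :
    ∀ i : Int, 0 ≤ i → i ≤ total →
      ts.foldl (fun i _ => (pvInnerA guests [] cap total 0 i).2) i
        = min (i + (ts.length : Int) * max cap 0) total := by
  induction ts with
  | nil => intro i h0 h1; simp; omega
  | cons t ts ih =>
    intro i h0 h1
    simp only [List.foldl_cons]
    rw [pvInnerA_snd guests cap total 0 i (le_refl 0) h0 h1 htot]
    rw [ih (min (i + max (cap - 0) 0) total) (by omega) (by omega)]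
    simp only [List.length_cons]
    push_cast
    have hexp : ((ts.length : Int) + 1) * max cap 0 = (ts.length : Int) * max cap 0 + max cap 0 := by ring
    rw [hexp]
    have hm0 : 0 ≤ (ts.length : Int) * max cap 0 := by positivity
    omega

-- ===== VERDICT (by name: the statement is the Claim_ definition above) =====
theorem AssignGuestsToTables_spec : Claim_equal_AssignGuestsToTables := by
  unfold Claim_equal_AssignGuestsToTables
  intro guests tables cap _
  unfold Spec_AssignGuestsToTables AssignGuestsToTables AssignGuestsToTables_alt
  by_cases hn : tables.length = 0
  · simp [hn]
  · simp only [hn, if_false]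
    rw [pvFold_eq guests cap (guests.length : Int) tables rfl 0 (le_refl 0) (by positivity)]
    set c : Int := max cap 0 with hc
    have hc0 : 0 ≤ c := by omega
    have hm0 : 0 ≤ (tables.length : Int) * c := by positivity
    rw [PySem.List.slice_from _ hm0]
    split
    · next h =>
      have : min (0 + (tables.length : Int) * c) (guests.length : Int)
           = (tables.length : Int) * c := by omega
      rw [this] at *
      rw [PySem.List.slice_from _ hm0]
    · next h =>
      have hge : (guests.length : Int) ≤ (tables.length : Int) * c := by omega
      exact (List.drop_eq_nil_of_le (by omega)).symm
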